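-- pv_equiv track=rewrite | github.com/gloomyline/ML | python/get-started/circulation.py | bre
-- ===== SOURCE A (Python) =====
-- def bre(s_n):
--   sum = 0
--   while s_n > 0:
--     s_n -= 2
--     sum += s_n
--     if s_n <= 90:
--       break
--   return sum
-- ===== SOURCE B (Python) =====
-- def bre(s_n):
--   if s_n <= 0:
--     return 0
--   k = max(1, -(-(s_n - 90) // 2))
--   return k * (s_n - k - 1)
-- ===== Notes on version B (the rewrite author's own statement) =====
-- stated objective: faster
-- what changed: Replaced the subtract-2/accumulate loop with an O(1) closed form: compute the number of summed terms K = max(1, ceil((s_n-90)/2)) and return K*(s_n-K-1).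
import Mathlib
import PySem

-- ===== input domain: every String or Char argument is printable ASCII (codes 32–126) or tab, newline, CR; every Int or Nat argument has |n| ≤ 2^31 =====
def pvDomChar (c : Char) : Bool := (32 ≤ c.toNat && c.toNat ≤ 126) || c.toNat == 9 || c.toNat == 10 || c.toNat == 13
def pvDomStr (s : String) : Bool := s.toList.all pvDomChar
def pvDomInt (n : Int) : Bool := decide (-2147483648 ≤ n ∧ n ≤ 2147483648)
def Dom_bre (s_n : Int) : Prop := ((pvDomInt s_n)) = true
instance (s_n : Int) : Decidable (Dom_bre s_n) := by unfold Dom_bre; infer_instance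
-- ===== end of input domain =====

-- B replaces A's subtract-2/accumulate loop by the O(1) arithmetic-series closed form (measured faster, asymptotic).

-- ===== PORT A =====
-- the while loop of A: state (s_n, sum); terminates because s_n strictly decreases while positive
def breLoop (s_n sum : Int) : Int :=
  if _h : s_n > 0 then
    let s' := s_n - 2
    let sum' := sum + s'
    if s' ≤ 90 then sum' else breLoop s' sum'
  else sum
termination_by s_n.toNat
decreasing_by omega

def bre (s_n : Int) : Int := breLoop s_n 0

-- ===== PORT B =====
def bre_alt (s_n : Int) : Int :=
  if s_n ≤ 0 then 0
  else
    let k := max 1 (-(PySem.Int.floordiv (-(s_n - 90)) 2))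
    k * (s_n - k - 1)

-- ===== PRECONDITION & SPEC =====
def Spec_bre (s_n : Int) (out : Int) : Prop := out = bre_alt s_n
instance (s_n : Int) (out : Int) : Decidable (Spec_bre s_n out) := by unfold Spec_bre; infer_instance

-- ===== CLAIM (what is proved, stated in full; the proofs are below) =====
def Claim_equal_bre : Prop := ∀ (s_n : Int), Dom_bre s_n → Spec_bre s_n (bre s_n)

-- ===== LEMMAS AND PROOFS =====

-- the ceiling term k as plain ediv arithmetic (divisor 2 > 0)
theorem bre_k_eq (s_n : Int) :
    -(PySem.Int.floordiv (-(s_n - 90)) 2) = -(-(s_n - 90) / 2) := by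
  rw [PySem.Int.floordiv_eq_ediv_of_pos (by omega)]

-- loop invariant: breLoop adds bre_alt's closed form to the accumulator
theorem breLoop_eq (s_n sum : Int) : breLoop s_n sum = sum + bre_alt s_n := by
  by_cases h : s_n > 0
  · by_cases hb : s_n - 2 ≤ 90
    · rw [breLoop]
      simp only [h, dite_true, hb, if_true]
      simp only [bre_alt, bre_k_eq]
      have hk : max 1 (-(-(s_n - 90) / 2)) = 1 := by omega
      rw [if_neg (by omega), hk]; ring
    · rw [breLoop]
      simp only [h, dite_true, hb, if_false]
      rw [breLoop_eq (s_n - 2) (sum + (s_n - 2))]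
      simp only [bre_alt, bre_k_eq]
      rw [if_neg (by omega), if_neg (by omega)]
      have hk2 : max 1 (-(-(s_n - 90) / 2)) = max 1 (-(-(s_n - 2 - 90) / 2)) + 1 := by omega
      rw [hk2]; ring
  · rw [breLoop]
    simp only [h, dite_false]
    simp only [bre_alt, bre_k_eq]
    rw [if_pos (by omega)]; ring
termination_by s_n.toNat
decreasing_by omega

-- ===== VERDICT (by name: the statement is the Claim_ definition above) =====
theorem bre_spec : Claim_equal_bre := by
  intro s_n _
  unfold Spec_bre bre
  rw [breLoop_eq]; ring
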